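-- pv_equiv track=rewrite | github.com/jvfaria-dev/Python | lab06_sa.py | sublista_crescente
-- ===== SOURCE A (Python) =====
-- def sublista_crescente(lista):
--     maior_sublista = []
--     sublista_temporaria = [lista[0]]
--
--     for i in range(1, len(lista)):
--         if lista[i] == sublista_temporaria[-1] + 1:
--             sublista_temporaria.append(lista[i])
--         else:
--             if len(sublista_temporaria) > len(maior_sublista):
--                 maior_sublista = sublista_temporaria.copy()
--             sublista_temporaria = [lista[i]]
--
--     if len(sublista_temporaria) > len(maior_sublista):
--         maior_sublista = sublista_temporaria
--
--     return maior_sublista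
-- ===== SOURCE B (Python) =====
-- def sublista_crescente(lista):
--     runs = []
--     for x in lista:
--         if runs and x == runs[-1][-1] + 1:
--             runs[-1].append(x)
--         else:
--             runs.append([x])
--     return max(runs, key=len)
-- ===== Notes on version B (the rewrite author's own statement) =====
-- stated objective: simpler
-- what changed: Instead of maintaining a running best/current pair with copy-on-close, B collects all maximal +1-runs in one pass and returns max(runs, key=len), whose first-maximal tie-breaking matches A's strict > update.
import Mathlib
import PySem

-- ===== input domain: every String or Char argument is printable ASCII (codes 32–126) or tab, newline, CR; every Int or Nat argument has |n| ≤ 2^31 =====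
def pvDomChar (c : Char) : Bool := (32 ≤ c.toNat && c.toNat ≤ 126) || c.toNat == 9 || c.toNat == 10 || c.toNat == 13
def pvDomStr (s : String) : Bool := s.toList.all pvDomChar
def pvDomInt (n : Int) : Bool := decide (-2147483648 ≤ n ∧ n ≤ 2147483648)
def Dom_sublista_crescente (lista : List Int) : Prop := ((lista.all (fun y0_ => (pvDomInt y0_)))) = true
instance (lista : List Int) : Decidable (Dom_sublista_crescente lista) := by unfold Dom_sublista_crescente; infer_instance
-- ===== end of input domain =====

-- B replaces A's running best/current pair with collecting all maximal +1-runs and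
-- taking the first longest via max(runs, key=len) — simpler, same O(n) cost.

-- ===== PORT A =====
def sublista_crescente (lista : List Int) : List Int :=
  match lista with
  | [] => []   -- Python raises IndexError on lista[0]; excluded by Pre_
  | x0 :: rest =>
    let s := rest.foldl (fun (st : List Int × List Int) x =>
        if x == (PySem.List.pyGet? st.2 (-1)).getD 0 + 1 then
          (st.1, st.2 ++ [x])
        else if st.2.length > st.1.length then
          (st.2, [x])
        else
          (st.1, [x])) (([] : List Int), [x0])
    if s.2.length > s.1.length then s.2 else s.1

-- ===== PORT B =====
def sublista_crescente_alt (lista : List Int) : List Int :=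
  let runs := lista.foldl (fun (runs : List (List Int)) x =>
      if !runs.isEmpty && x == (PySem.List.pyGet? (runs.getLast?.getD []) (-1)).getD 0 + 1 then
        runs.dropLast ++ [runs.getLast?.getD [] ++ [x]]
      else
        runs ++ [[x]]) []
  match PySem.List.max? runs (fun r => (r.length : Int)) with
  | some m => m
  | none => []   -- Python max raises ValueError on empty lista; excluded by Pre_

-- ===== PRECONDITION & SPEC =====
-- Python A raises IndexError on the empty list (lista[0]); B raises ValueError there (max of empty).
def Pre_sublista_crescente (lista : List Int) : Prop := lista ≠ []
instance (lista : List Int) : Decidable (Pre_sublista_crescente lista) := by unfold Pre_sublista_crescente; infer_instance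
def pvWitness_sublista_crescente : List Int := [1, 2, 5]

def Spec_sublista_crescente (lista : List Int) (out : List Int) : Prop := out = sublista_crescente_alt lista
instance (lista : List Int) (out : List Int) : Decidable (Spec_sublista_crescente lista out) := by unfold Spec_sublista_crescente; infer_instance

-- ===== CLAIM (what is proved, stated in full; the proofs are below) =====
def Claim_equal_sublista_crescente : Prop := ∀ (lista : List Int), Dom_sublista_crescente lista → Pre_sublista_crescente lista → Spec_sublista_crescente lista (sublista_crescente lista)

-- ===== LEMMAS AND PROOFS =====

-- the first longest element of rs (ties to the earlier one), as A's running fold computes it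
def pvClose (rs : List (List Int)) : List Int :=
  rs.foldl (fun m r => if r.length > m.length then r else m) []

theorem pvClose_concat (rs : List (List Int)) (t : List Int) :
    pvClose (rs ++ [t]) = if t.length > (pvClose rs).length then t else pvClose rs := by
  simp [pvClose, List.foldl_append]

theorem pvClose_cons (h : List Int) (t : List (List Int)) :
    pvClose (h :: t) = t.foldl (fun m r => if r.length > m.length then r else m) h := by
  cases h <;> simp [pvClose]

theorem pvMax?_cons_close (t : List (List Int)) : ∀ (a : List Int),
    PySem.List.max? (a :: t) (fun r => (r.length : Int)) =
      some (t.foldl (fun m r => if r.length > m.length then r else m) a) := by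
  induction t with
  | nil => intro a; rfl
  | cons b t ih =>
    intro a
    have h2 : PySem.List.max? (a :: b :: t) (fun r => (r.length : Int)) =
        PySem.List.max? ((if b.length > a.length then b else a) :: t) (fun r => (r.length : Int)) := by
      by_cases h : b.length > a.length <;>
        simp [PySem.List.max?, h, Nat.cast_lt]
    rw [h2, ih]
    by_cases h : b.length > a.length <;> simp [h]

theorem pvMax?_close (l : List (List Int)) (h : l ≠ []) :
    PySem.List.max? l (fun r => (r.length : Int)) = some (pvClose l) := by
  cases l with
  | nil => exact absurd rfl h
  | cons a t => rw [pvMax?_cons_close, pvClose_cons]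

theorem pvRuns_ne_nil (rest : List Int) (runs : List (List Int)) (h : runs ≠ []) :
    rest.foldl (fun (runs : List (List Int)) x =>
      if !runs.isEmpty && x == (PySem.List.pyGet? (runs.getLast?.getD []) (-1)).getD 0 + 1 then
        runs.dropLast ++ [runs.getLast?.getD [] ++ [x]]
      else
        runs ++ [[x]]) runs ≠ [] := by
  induction rest generalizing runs with
  | nil => exact h
  | cons x rest ih =>
    simp only [List.foldl_cons]
    split <;> exact ih _ (by simp)

theorem pvInv (rest : List Int) (rs : List (List Int)) (t : List Int) (ht : t ≠ []) :
    (let s := rest.foldl (fun (st : List Int × List Int) x =>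
        if x == (PySem.List.pyGet? st.2 (-1)).getD 0 + 1 then
          (st.1, st.2 ++ [x])
        else if st.2.length > st.1.length then
          (st.2, [x])
        else
          (st.1, [x])) (pvClose rs, t)
     if s.2.length > s.1.length then s.2 else s.1)
    = pvClose (rest.foldl (fun (runs : List (List Int)) x =>
      if !runs.isEmpty && x == (PySem.List.pyGet? (runs.getLast?.getD []) (-1)).getD 0 + 1 then
        runs.dropLast ++ [runs.getLast?.getD [] ++ [x]]
      else
        runs ++ [[x]]) (rs ++ [t])) := by
  induction rest generalizing rs t with
  | nil =>
    simp only [List.foldl_nil, pvClose_concat]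
  | cons x rest ih =>
    have hb : (rs ++ [t]).isEmpty = false := by simp
    simp only [List.foldl_cons, hb, Bool.not_false, Bool.true_and, List.getLast?_concat,
      List.dropLast_concat, Option.getD_some]
    by_cases hc : (x == (PySem.List.pyGet? t (-1)).getD 0 + 1) = true
    · rw [if_pos hc, if_pos hc]
      exact ih rs (t ++ [x]) (by simp)
    · rw [if_neg hc, if_neg hc]
      by_cases hl : t.length > (pvClose rs).length
      · rw [if_pos hl]
        have := ih (rs ++ [t]) [x] (by simp)
        rwa [pvClose_concat, if_pos hl] at this
      · rw [if_neg hl]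
        have := ih (rs ++ [t]) [x] (by simp)
        rwa [pvClose_concat, if_neg hl] at this

-- ===== VERDICT (by name: the statement is the Claim_ definition above) =====
theorem sublista_crescente_spec : Claim_equal_sublista_crescente := by
  intro lista _ hpre
  unfold Spec_sublista_crescente
  cases lista with
  | nil => exact absurd rfl hpre
  | cons x0 rest =>
    unfold sublista_crescente sublista_crescente_alt
    simp only [List.foldl_cons, List.isEmpty_nil, Bool.not_true, Bool.false_and,
      Bool.false_eq_true, if_false, List.nil_append]
    have hne : rest.foldl (fun (runs : List (List Int)) x =>
        if !runs.isEmpty && x == (PySem.List.pyGet? (runs.getLast?.getD []) (-1)).getD 0 + 1 then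
          runs.dropLast ++ [runs.getLast?.getD [] ++ [x]]
        else
          runs ++ [[x]]) [[x0]] ≠ [] := pvRuns_ne_nil rest [[x0]] (by simp)
    rw [pvMax?_close _ hne]
    have h := pvInv rest [] [x0] (by simp)
    have h0 : pvClose ([] : List (List Int)) = [] := rfl
    rw [h0] at h
    simpa using h
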